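-- pv_equiv track=rewrite | github.com/xzyuming/User-Scheduling-in-5G | Project.py | IpRe
-- ===== SOURCE A (Python) =====
-- def IpRe(arr):
--     rem = []
--     res = [arr[0]]
--     max = arr[0][1]
--     for i in range(1,len(arr)):
--         res.append(arr[i])
--         if res[-1][1]<=res[-2][1]:
--             rem.append(res.pop())
--     return res
-- ===== SOURCE B (Python) =====
-- def IpRe(arr):
--     prefmax = []
--     m = None
--     for x in arr:
--         if m is None:
--             m = x[1]
--         else:
--             m = x[1] if x[1] > m else m
--         prefmax.append(m)
--     res = [arr[0]]
--     for x, pm in zip(arr[1:], prefmax):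
--         if x[1] > pm:
--             res.append(x)
--     return res
-- ===== Notes on version B (the rewrite author's own statement) =====
-- stated objective: alternative
-- what changed: A's single append-then-pop pass comparing res[-1] with res[-2] is replaced by two passes: build a prefix-maximum table of the second components, then keep each later element iff it strictly exceeds the prefix maximum of everything before it.
import Mathlib
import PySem

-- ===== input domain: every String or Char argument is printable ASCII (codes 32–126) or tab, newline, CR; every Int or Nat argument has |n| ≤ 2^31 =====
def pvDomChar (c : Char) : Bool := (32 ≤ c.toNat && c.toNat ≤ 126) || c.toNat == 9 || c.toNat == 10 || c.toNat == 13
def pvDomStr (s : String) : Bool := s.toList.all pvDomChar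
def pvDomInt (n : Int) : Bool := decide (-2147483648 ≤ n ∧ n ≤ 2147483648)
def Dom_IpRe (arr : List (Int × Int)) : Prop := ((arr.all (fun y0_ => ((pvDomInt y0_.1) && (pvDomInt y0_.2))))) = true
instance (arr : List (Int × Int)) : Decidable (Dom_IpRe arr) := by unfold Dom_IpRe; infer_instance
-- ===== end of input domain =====

-- B replaces A's single append/compare/pop pass over res by two passes: first build a
-- prefix-maximum table of the second components, then keep exactly the elements strictly
-- above the previous prefix maximum (objective: alternative decomposition, same cost).

-- ===== PORT A =====
-- literal transliteration of Source A: res = [arr[0]]; for i in range(1, len(arr)):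
-- res.append(arr[i]); if res[-1][1] <= res[-2][1]: rem.append(res.pop());
-- the state is (rem, res); rem never influences the returned res but is carried faithfully
def IpRe (arr : List (Int × Int)) : List (Int × Int) :=
  match PySem.List.pyGet? arr 0 with
  | none => []   -- arr[0] raises IndexError here; excluded by Pre_IpRe
  | some a0 =>
    let st :=
      (PySem.List.pyRange 1 arr.length 1).foldl
        (fun (st : List (Int × Int) × List (Int × Int)) i =>
          let res := st.2 ++ [PySem.List.pyGetD arr i (0, 0)]
          if (PySem.List.pyGetD res (-1) (0, 0)).2 ≤ (PySem.List.pyGetD res (-2) (0, 0)).2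
          then (st.1 ++ [PySem.List.pyGetD res (-1) (0, 0)], res.dropLast)
          else (st.1, res))
        ([], [a0])
    st.2

-- ===== PORT B =====
-- literal transliteration of Source B: one loop builds prefmax (state: the list and the
-- running max, None before the first element), then a filter loop over zip(arr[1:], prefmax)
def IpRe_alt (arr : List (Int × Int)) : List (Int × Int) :=
  let pm :=
    arr.foldl
      (fun (s : List Int × Option Int) x =>
        let m := match s.2 with
          | none => x.2
          | some mv => if x.2 > mv then x.2 else mv
        (s.1 ++ [m], some m))
      ([], none)
  let prefmax := pm.1
  match PySem.List.pyGet? arr 0 with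
  | none => []   -- arr[0] raises IndexError here; excluded by Pre_IpRe
  | some a0 =>
    ((PySem.List.slice arr (some 1) none).zip prefmax).foldl
      (fun res p => if p.1.2 > p.2 then res ++ [p.1] else res)
      [a0]

-- ===== PRECONDITION & SPEC =====
-- A evaluates arr[0], which raises IndexError on the empty list, so Pre_ excludes only [].
def Pre_IpRe (arr : List (Int × Int)) : Prop := arr ≠ []
instance (arr : List (Int × Int)) : Decidable (Pre_IpRe arr) := by unfold Pre_IpRe; infer_instance

def pvWitness_IpRe : (List (Int × Int)) := [(1, 2), (3, 1), (4, 5)]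

def Spec_IpRe (arr : List (Int × Int)) (out : List (Int × Int)) : Prop := out = IpRe_alt arr
instance (arr : List (Int × Int)) (out : List (Int × Int)) : Decidable (Spec_IpRe arr out) := by unfold Spec_IpRe; infer_instance

-- ===== CLAIM (what is proved, stated in full; the proofs are below) =====
def Claim_equal_IpRe : Prop := ∀ (arr : List (Int × Int)), Dom_IpRe arr → Pre_IpRe arr → Spec_IpRe arr (IpRe arr)

-- ===== LEMMAS AND PROOFS =====

-- reference: keep the elements whose second component strictly exceeds the running max m
def pvKeep (m : Int) : List (Int × Int) → List (Int × Int)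
  | [] => []
  | x :: xs => if m < x.2 then x :: pvKeep x.2 xs else pvKeep m xs

-- the prefix-max tail: pvPmT m ys lists the running maxima of m over ys, one per element
def pvPmT (m : Int) : List Int → List Int
  | [] => []
  | y :: ys => max m y :: pvPmT (max m y) ys

-- res[-2] of pre ++ [x] is the last element of pre
theorem pvPenult (pre : List (Int × Int)) (x d : Int × Int) (h : pre ≠ []) :
    PySem.List.pyGetD (pre ++ [x]) (-2) d = pre.getLastD d := by
  have h1 : 0 < pre.length := List.length_pos_iff.mpr h
  rw [PySem.List.pyGetD_neg_ofNat (pre ++ [x]) 2 d (by omega) (by simp; omega)]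
  have h2 : (pre ++ [x]).length - 2 < pre.length := by simp; omega
  rw [List.getElem_append_left h2]
  rw [List.getLastD_eq_getLast?, List.getLast?_eq_some_getLast h, Option.getD_some,
    List.getLast_eq_getElem]
  congr 1
  simp

-- A's loop body as a function of the fetched element
def pvStepA (st : List (Int × Int) × List (Int × Int)) (x : Int × Int) :
    List (Int × Int) × List (Int × Int) :=
  let res := st.2 ++ [x]
  if (PySem.List.pyGetD res (-1) (0, 0)).2 ≤ (PySem.List.pyGetD res (-2) (0, 0)).2
  then (st.1 ++ [PySem.List.pyGetD res (-1) (0, 0)], res.dropLast)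
  else (st.1, res)

-- A's loop, characterised: res stays pre ++ (kept elements); rem is dead for the result
theorem pvFoldA (rest : List (Int × Int)) :
    ∀ (rem pre : List (Int × Int)), pre ≠ [] →
      (rest.foldl pvStepA (rem, pre)).2 = pre ++ pvKeep (pre.getLastD (0, 0)).2 rest := by
  induction rest with
  | nil => intro rem pre h; simp [pvKeep]
  | cons x xs ih =>
    intro rem pre h
    have hstep : pvStepA (rem, pre) x =
        if x.2 ≤ (pre.getLastD (0,0)).2 then (rem ++ [x], pre) else (rem, pre ++ [x]) := by
      simp only [pvStepA, PySem.List.pyGetD_neg_one_append_singleton,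
        pvPenult pre x (0,0) h, List.dropLast_concat]
    rw [List.foldl_cons, hstep]
    by_cases hc : x.2 ≤ (pre.getLastD (0,0)).2
    · rw [if_pos hc, ih _ pre h]
      have hn : ¬ (pre.getLastD (0,0)).2 < x.2 := by omega
      simp only [pvKeep]
      rw [if_neg hn]
    · rw [if_neg hc, ih _ (pre ++ [x]) (by simp)]
      have hx : (pre.getLastD (0,0)).2 < x.2 := by omega
      have hl : (pre ++ [x]).getLastD (0,0) = x := by
        simp [List.getLastD_eq_getLast?]
      rw [hl]
      simp only [pvKeep]
      rw [if_pos hx, List.append_assoc, List.singleton_append]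

-- B's first loop, characterised
theorem pvFoldPm (l : List (Int × Int)) :
    ∀ (pm0 : List Int) (m : Int),
      (l.foldl
        (fun (s : List Int × Option Int) x =>
          let m := match s.2 with
            | none => x.2
            | some mv => if x.2 > mv then x.2 else mv
          (s.1 ++ [m], some m)) (pm0, some m)) =
      (pm0 ++ pvPmT m (l.map Prod.snd), some ((l.map Prod.snd).foldl max m)) := by
  induction l with
  | nil => intro pm0 m; simp [pvPmT]
  | cons x xs ih =>
    intro pm0 m
    have hm : (if x.2 > m then x.2 else m) = max m x.2 := by
      rw [max_def]; split_ifs <;> omega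
    simp only [List.foldl_cons, hm, ih, List.map_cons, pvPmT, List.append_assoc,
      List.singleton_append]

-- B's second loop, characterised
theorem pvFoldB (rest : List (Int × Int)) :
    ∀ (m : Int) (acc : List (Int × Int)),
      ((rest.zip (m :: pvPmT m (rest.map Prod.snd))).foldl
        (fun res p => if p.1.2 > p.2 then res ++ [p.1] else res) acc) =
      acc ++ pvKeep m rest := by
  induction rest with
  | nil => intro m acc; simp [pvKeep]
  | cons x xs ih =>
    intro m acc
    simp only [List.map_cons, pvPmT, List.zip_cons_cons, List.foldl_cons, pvKeep]
    by_cases hx : m < x.2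
    · rw [if_pos (show x.2 > m from hx), if_pos hx, max_eq_right (le_of_lt hx), ih]
      simp
    · rw [if_neg (show ¬ x.2 > m from hx), if_neg hx, max_eq_left (by omega), ih]

theorem pvMain : ∀ (arr : List (Int × Int)), arr ≠ [] → IpRe arr = IpRe_alt arr := by
  intro arr h
  obtain ⟨a, rest, rfl⟩ := List.exists_cons_of_ne_nil h
  have hget : PySem.List.pyGet? (a :: rest) 0 = some a := by
    simp [PySem.List.pyGet?, PySem.List.pyIdx?]
  have hA : IpRe (a :: rest) = a :: pvKeep a.2 rest := by
    unfold IpRe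
    rw [hget]
    show ((PySem.List.pyRange 1 ((a :: rest).length : Int) 1).foldl
        (fun st i => pvStepA st (PySem.List.pyGetD (a :: rest) i (0, 0))) ([], [a])).2 = _
    rw [PySem.List.foldl_pyRange_pyGetD' (xs := a :: rest) (d := (0,0)) (f := pvStepA)
      (init := (([] : List (Int × Int)), [a])) (a := 1) (by omega)]
    have : ((a :: rest).drop (1 : Int).toNat) = rest := by simp
    rw [this, pvFoldA rest [] [a] (by simp)]
    simp
  have hB : IpRe_alt (a :: rest) = a :: pvKeep a.2 rest := by
    unfold IpRe_alt
    rw [hget]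
    show (((PySem.List.slice (a :: rest) (some 1) none).zip
        (rest.foldl (fun (s : List Int × Option Int) x =>
          let m := match s.2 with
            | none => x.2
            | some mv => if x.2 > mv then x.2 else mv
          (s.1 ++ [m], some m)) ([a.2], some a.2)).1).foldl
        (fun res p => if p.1.2 > p.2 then res ++ [p.1] else res) [a]) = _
    rw [pvFoldPm rest [a.2] a.2, PySem.List.slice_from_one]
    show ((rest.zip ((a.2 :: pvPmT a.2 (rest.map Prod.snd)))).foldl
        (fun res p => if p.1.2 > p.2 then res ++ [p.1] else res) [a]) = _
    rw [pvFoldB rest a.2 [a]]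
    simp
  rw [hA, hB]

-- ===== VERDICT (by name: the statement is the Claim_ definition above) =====
theorem IpRe_spec : Claim_equal_IpRe := by
  intro arr _ hpre
  exact pvMain arr hpre
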